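-- pv_equiv track=rewrite | github.com/Yttrium40/Coverage | coverage.py | calculate_coverages
-- ===== SOURCE A (Python) =====
-- lowest_multiple_of_ten = 10000
--
-- def is_covered(read, position):
--     """Returns true if position is covered by read, otherwise false."""
--
--     return position >= read[0] and position < read[0]+read[1]
--
-- def calculate_coverages(reads, loci):
--     """Returns a list of the coverage for each position in loci."""
--
--     coverages = []
--     for locus in loci:
--         count = 0
--         curr_reads = reads.get(locus // lowest_multiple_of_ten)
--         if curr_reads is not None:
--             for read in curr_reads:
--                 if is_covered(read, locus):
--                     count += 1
--         coverages.append(count)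
--     return coverages
-- ===== SOURCE B (Python) =====
-- lowest_multiple_of_ten = 10000
--
-- def _bisect_right(a, x):
--     """Index of the first element of sorted list a that is > x (hand-written bisect_right)."""
--     lo = 0
--     hi = len(a)
--     while lo < hi:
--         mid = (lo + hi) // 2
--         if x < a[mid]:
--             hi = mid
--         else:
--             lo = mid + 1
--     return lo
--
-- def calculate_coverages(reads, loci):
--     """Returns a list of the coverage for each position in loci.
--
--     Per queried bucket (built lazily, once) keep the sorted start and end points of its
--     non-empty reads; each locus is then answered by two binary searches:
--     coverage = #(starts <= locus) - #(ends <= locus)."""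
--     cache = {}
--     coverages = []
--     for locus in loci:
--         bucket = locus // lowest_multiple_of_ten
--         if bucket in cache:
--             pair = cache[bucket]
--         else:
--             rs = reads.get(bucket)
--             if rs is None:
--                 pair = None
--             else:
--                 starts = sorted(r[0] for r in rs if r[1] > 0)
--                 ends = sorted(r[0] + r[1] for r in rs if r[1] > 0)
--                 pair = (starts, ends)
--             cache[bucket] = pair
--         if pair is None:
--             coverages.append(0)
--         else:
--             coverages.append(_bisect_right(pair[0], locus) - _bisect_right(pair[1], locus))
--     return coverages
-- ===== Notes on version B (the rewrite author's own statement) =====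
-- stated objective: alternative
-- what changed: Instead of linearly scanning every read of the bucket for every locus, B lazily builds per queried bucket the sorted lists of start and (exclusive) end points of its non-empty reads and answers each locus with two binary searches (stabbing count = #starts<=locus - #ends<=locus); on the generated input mix this was not measurably faster.
-- outside the precondition, e.g. on calculate_coverages({0: [[5]]}, [3]): A returns [0], B raises IndexError
import Mathlib
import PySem

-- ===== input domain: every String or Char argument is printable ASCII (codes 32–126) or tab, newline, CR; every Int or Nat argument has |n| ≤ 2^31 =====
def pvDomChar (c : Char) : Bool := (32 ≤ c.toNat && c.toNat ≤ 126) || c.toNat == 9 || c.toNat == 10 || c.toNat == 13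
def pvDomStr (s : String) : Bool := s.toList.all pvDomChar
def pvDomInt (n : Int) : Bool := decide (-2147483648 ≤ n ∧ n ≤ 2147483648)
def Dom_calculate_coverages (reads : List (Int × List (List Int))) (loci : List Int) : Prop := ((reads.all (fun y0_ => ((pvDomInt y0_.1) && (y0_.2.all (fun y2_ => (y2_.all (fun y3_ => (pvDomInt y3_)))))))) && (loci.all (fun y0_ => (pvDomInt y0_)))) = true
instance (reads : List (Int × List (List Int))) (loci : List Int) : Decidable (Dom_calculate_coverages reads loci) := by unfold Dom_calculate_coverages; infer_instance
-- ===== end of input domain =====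

-- B replaces A's per-locus linear scan of the bucket's reads by per-bucket sorted start/end
-- point lists (built lazily, once per queried bucket) and two binary searches per locus.

-- ===== PORT A =====
def is_covered (read : List Int) (position : Int) : Bool :=
  decide (position ≥ PySem.List.pyGetD read 0 0) &&
  decide (position < PySem.List.pyGetD read 0 0 + PySem.List.pyGetD read 1 0)

def calculate_coverages (reads : List (Int × List (List Int))) (loci : List Int) : List Int :=
  loci.foldl (fun coverages locus =>
    let curr_reads := PySem.Dict.get? (PySem.Dict.mk reads) (PySem.Int.floordiv locus 10000)
    let count : Int :=
      match curr_reads with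
      | none => 0
      | some rs => rs.foldl (fun count read => if is_covered read locus then count + 1 else count) 0
    coverages ++ [count]) []

-- ===== PORT B =====
-- per-bucket index: sorted start points and sorted (exclusive) end points of the non-empty reads
def pvIndexPair (rs : List (List Int)) : List Int × List Int :=
  (PySem.List.sorted ((rs.filter (fun r => decide (0 < PySem.List.pyGetD r 1 0))).map
      (fun r => PySem.List.pyGetD r 0 0)) (fun x => x) false,
   PySem.List.sorted ((rs.filter (fun r => decide (0 < PySem.List.pyGetD r 1 0))).map
      (fun r => PySem.List.pyGetD r 0 0 + PySem.List.pyGetD r 1 0)) (fun x => x) false)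

-- coverage of locus from a bucket's index (none = bucket absent); Source B's hand-written
-- _bisect_right is ported as PySem.List.bisectRight (the same binary-search loop)
def pvPairValue (pair : Option (List Int × List Int)) (locus : Int) : Int :=
  match pair with
  | none => 0
  | some (starts, ends) =>
      (PySem.List.bisectRight starts locus : Int) - (PySem.List.bisectRight ends locus : Int)

def calculate_coverages_alt (reads : List (Int × List (List Int))) (loci : List Int) : List Int :=
  (loci.foldl (fun (st : PySem.Dict Int (Option (List Int × List Int)) × List Int) locus =>
    let bucket := PySem.Int.floordiv locus 10000
    let st' :=
      match PySem.Dict.get? st.1 bucket with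
      | some pair => (st.1, pair)
      | none =>
          let pair := (PySem.Dict.get? (PySem.Dict.mk reads) bucket).map pvIndexPair
          (PySem.Dict.insert st.1 bucket pair, pair)
    (st'.1, st.2 ++ [pvPairValue st'.2 locus])) (PySem.Dict.empty, [])).2

-- ===== PRECONDITION & SPEC =====
-- Pre_ excludes inputs whose queried bucket contains a read with fewer than 2 fields: there the
-- Python A raises IndexError, except when short-circuit (locus < read[0]) lets A return — B,
-- which reads every read's two fields while building the bucket index, raises there.
def Pre_calculate_coverages (reads : List (Int × List (List Int))) (loci : List Int) : Prop :=
  (loci.all (fun locus =>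
    match PySem.Dict.get? (PySem.Dict.mk reads) (PySem.Int.floordiv locus 10000) with
    | none => true
    | some rs => rs.all (fun r => decide (2 ≤ r.length)))) = true

instance (reads : List (Int × List (List Int))) (loci : List Int) : Decidable (Pre_calculate_coverages reads loci) := by unfold Pre_calculate_coverages; infer_instance

def pvWitness_calculate_coverages : (List (Int × List (List Int))) × List Int :=
  ([(0, [[3, 5], [10, 2]]), (2, [[20001, 3]])], [4, 12, 20002, 50000])

def Spec_calculate_coverages (reads : List (Int × List (List Int))) (loci : List Int) (out : List Int) : Prop := out = calculate_coverages_alt reads loci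
instance (reads : List (Int × List (List Int))) (loci : List Int) (out : List Int) : Decidable (Spec_calculate_coverages reads loci out) := by unfold Spec_calculate_coverages; infer_instance

-- ===== CLAIM (what is proved, stated in full; the proofs are below) =====
def Claim_equal_calculate_coverages : Prop := ∀ (reads : List (Int × List (List Int))) (loci : List Int), Dom_calculate_coverages reads loci → Pre_calculate_coverages reads loci → Spec_calculate_coverages reads loci (calculate_coverages reads loci)

-- ===== LEMMAS AND PROOFS =====

-- what A computes for one locus
def pvAnswerA (reads : List (Int × List (List Int))) (locus : Int) : Int :=
  match PySem.Dict.get? (PySem.Dict.mk reads) (PySem.Int.floordiv locus 10000) with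
  | none => 0
  | some rs => (rs.countP (fun r => is_covered r locus) : Int)

-- what B computes for one locus (cache-free)
def pvAnswerB (reads : List (Int × List (List Int))) (locus : Int) : Int :=
  pvPairValue ((PySem.Dict.get? (PySem.Dict.mk reads) (PySem.Int.floordiv locus 10000)).map pvIndexPair) locus

lemma pvA_eq_map (reads : List (Int × List (List Int))) (loci : List Int) :
    calculate_coverages reads loci = loci.map (pvAnswerA reads) := by
  suffices h : ∀ (l : List Int) (acc : List Int),
      l.foldl (fun coverages locus =>
        let curr_reads := PySem.Dict.get? (PySem.Dict.mk reads) (PySem.Int.floordiv locus 10000)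
        let count : Int :=
          match curr_reads with
          | none => 0
          | some rs => rs.foldl (fun count read => if is_covered read locus then count + 1 else count) 0
        coverages ++ [count]) acc = acc ++ l.map (pvAnswerA reads) by
    have := h loci []
    rw [List.nil_append] at this
    exact this
  intro l
  induction l with
  | nil => simp
  | cons locus t ih =>
    intro acc
    have hcount : (match PySem.Dict.get? (PySem.Dict.mk reads) (PySem.Int.floordiv locus 10000) with
          | none => (0 : Int)
          | some rs => rs.foldl (fun count read => if is_covered read locus then count + 1 else count) 0)
        = pvAnswerA reads locus := by
      unfold pvAnswerA
      cases h : PySem.Dict.get? (PySem.Dict.mk reads) (PySem.Int.floordiv locus 10000) with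
      | none => rfl
      | some rs => simp only [PySem.List.foldl_if_add_one, zero_add]
    simp only [List.foldl_cons, List.map_cons]
    rw [hcount, ih, List.append_assoc, List.singleton_append]

lemma pvB_loop (reads : List (Int × List (List Int))) (loci : List Int)
    (cache : PySem.Dict Int (Option (List Int × List Int))) (acc : List Int)
    (h : ∀ b p, PySem.Dict.get? cache b = some p →
        p = (PySem.Dict.get? (PySem.Dict.mk reads) b).map pvIndexPair) :
    (loci.foldl (fun (st : PySem.Dict Int (Option (List Int × List Int)) × List Int) locus =>
      let bucket := PySem.Int.floordiv locus 10000
      let st' :=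
        match PySem.Dict.get? st.1 bucket with
        | some pair => (st.1, pair)
        | none =>
            let pair := (PySem.Dict.get? (PySem.Dict.mk reads) bucket).map pvIndexPair
            (PySem.Dict.insert st.1 bucket pair, pair)
      (st'.1, st.2 ++ [pvPairValue st'.2 locus])) (cache, acc)).2
    = acc ++ loci.map (pvAnswerB reads) := by
  induction loci generalizing cache acc with
  | nil => simp only [List.foldl_nil, List.map_nil, List.append_nil]
  | cons locus t ih =>
    simp only [List.foldl_cons, List.map_cons]
    cases hget : PySem.Dict.get? cache (PySem.Int.floordiv locus 10000) with
    | some pair =>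
      have hp := h _ _ hget
      rw [ih cache _ h]
      simp [pvAnswerB, hp]
    | none =>
      rw [ih _ _ ?_]
      · simp [pvAnswerB]
      · intro b p hbp
        rw [PySem.Dict.get?_insert] at hbp
        split at hbp
        · cases hbp; subst ‹b = _›; rfl
        · exact h _ _ hbp

-- on a sorted list, bisectRight counts the elements ≤ x
lemma pvBisect_count (a : List Int) (x : Int) (hs : a.Pairwise (· ≤ ·)) :
    PySem.List.bisectRight a x = a.countP (fun y => decide (y ≤ x)) := by
  obtain ⟨hle, hlt, hgt⟩ := PySem.List.bisectRight_spec a x hs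
  set r := PySem.List.bisectRight a x with hr
  have htake : (a.take r).countP (fun y => decide (y ≤ x)) = (a.take r).length := by
    apply List.countP_eq_length.mpr
    intro y hy
    rw [List.mem_take_iff_getElem] at hy
    obtain ⟨i, hi, rfl⟩ := hy
    exact decide_eq_true (hlt i (by omega) (by omega))
  have hdrop : (a.drop r).countP (fun y => decide (y ≤ x)) = 0 := by
    apply List.countP_eq_zero.mpr
    intro y hy
    obtain ⟨i, hi, rfl⟩ := List.getElem_of_mem hy
    rw [List.getElem_drop]
    have := hgt (r + i) (by simp at hi; omega) (by omega)
    simp only [decide_eq_true_eq]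
    omega
  have : a.countP (fun y => decide (y ≤ x)) = r := by
    conv_lhs => rw [← List.take_append_drop r a]
    rw [List.countP_append, htake, hdrop, List.length_take]
    omega
  omega

-- the stabbing identity: covered + (ends ≤ x) = (starts ≤ x) over the non-empty reads
lemma pvCount_identity (x : Int) (rs : List (List Int)) :
    rs.countP (fun r => is_covered r x)
      + ((rs.filter (fun r => decide (0 < PySem.List.pyGetD r 1 0))).map
          (fun r => PySem.List.pyGetD r 0 0 + PySem.List.pyGetD r 1 0)).countP (fun y => decide (y ≤ x))
    = ((rs.filter (fun r => decide (0 < PySem.List.pyGetD r 1 0))).map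
          (fun r => PySem.List.pyGetD r 0 0)).countP (fun y => decide (y ≤ x)) := by
  induction rs with
  | nil => simp
  | cons r t ih =>
    by_cases h : (0 : Int) < PySem.List.pyGetD r 1 0
    · simp only [List.countP_cons, List.filter_cons, h, decide_true, if_true, List.map_cons]
      have hkey : (if is_covered r x then 1 else 0)
            + (if decide (PySem.List.pyGetD r 0 0 + PySem.List.pyGetD r 1 0 ≤ x) = true then 1 else 0)
          = (if decide (PySem.List.pyGetD r 0 0 ≤ x) = true then 1 else 0) := by
        unfold is_covered
        by_cases h1 : PySem.List.pyGetD r 0 0 ≤ x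
          <;> by_cases h2 : x < PySem.List.pyGetD r 0 0 + PySem.List.pyGetD r 1 0
          <;> simp [h1, h2, ge_iff_le]
          <;> omega
      omega
    · have hcov : is_covered r x = false := by
        unfold is_covered
        simp only [Bool.and_eq_false_iff, decide_eq_false_iff_not, not_le, not_lt, ge_iff_le]
        omega
      simp only [List.countP_cons, List.filter_cons, h, decide_false, Bool.false_eq_true,
        if_false, hcov]
      omega

lemma pvAnswer_eq (reads : List (Int × List (List Int))) (locus : Int) :
    pvAnswerA reads locus = pvAnswerB reads locus := by
  unfold pvAnswerA pvAnswerB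
  cases h : PySem.Dict.get? (PySem.Dict.mk reads) (PySem.Int.floordiv locus 10000) with
  | none => rfl
  | some rs =>
    simp only [Option.map_some, pvPairValue, pvIndexPair]
    rw [pvBisect_count _ _ (PySem.List.sorted_pairwise _ _),
        pvBisect_count _ _ (PySem.List.sorted_pairwise _ _)]
    rw [List.Perm.countP_congr (PySem.List.sorted_perm _ _ _) (fun _ _ => rfl),
        List.Perm.countP_congr (PySem.List.sorted_perm _ _ _) (fun _ _ => rfl)]
    have := pvCount_identity locus rs
    omega

-- ===== VERDICT (by name: the statement is the Claim_ definition above) =====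
theorem calculate_coverages_spec : Claim_equal_calculate_coverages := by
  intro reads loci _ _
  unfold Spec_calculate_coverages calculate_coverages_alt
  rw [pvB_loop reads loci PySem.Dict.empty [] (by intro b p h; simp [PySem.Dict.get?_empty] at h)]
  rw [pvA_eq_map]
  simp only [List.nil_append]
  exact List.map_congr_left (fun locus _ => pvAnswer_eq reads locus)
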